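-- pv_equiv track=rewrite | github.com/baebaemin/Solved_Algorithm | 프로그래머스/lv1/92334. 신고 결과 받기/신고 결과 받기.py | solution
-- ===== SOURCE A (Python) =====
-- def solution(id_list, report, k):
--     reporter_dict = {}
--     reported_dict = {}
--     answer = []
--
--     for id in id_list:
--         reporter_dict[id] = 0 # key: 신고자 / values: 신고대상
--         reported_dict[id] = [] # key: 신고당한자 / values: 신고한사람
--
--     for rep in report:
--         reporter, reported = map(str, rep.split())
--         reported_dict[reported].append(reporter)
--
--     for key in reported_dict:
--         reported_dict[key] = set(reported_dict[key])
--         # key와 key를 신고한 유저의 id들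
--         if len(reported_dict[key]) >= k:
--             for id in reported_dict[key]:
--                 reporter_dict[id] += 1
--
--     for id in reporter_dict:
--          answer.append(reporter_dict[id])
--     return answer
-- ===== SOURCE B (Python) =====
-- def solution(id_list, report, k):
--     # Compute each answer entry independently: for every (deduped) id, rescan
--     # the parsed reports to find the distinct targets it reported, and count
--     # those whose distinct-reporter count reaches k. No counting dicts.
--     pairs = [tuple(rep.split()) for rep in report]
--
--     def score(u):
--         return sum(1 for t in {b for a, b in pairs if a == u}
--                    if len({a for a, b in pairs if b == t}) >= k)
--
--     return [score(u) for u in dict.fromkeys(id_list)]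
-- ===== Notes on version B (the rewrite author's own statement) =====
-- stated objective: simpler
-- what changed: B computes each output entry independently: per deduped id it rescans the parsed report list with set comprehensions (distinct targets this id reported whose distinct-reporter count reaches k), replacing A's staged dict tallies with a direct per-element count.
import Mathlib
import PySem

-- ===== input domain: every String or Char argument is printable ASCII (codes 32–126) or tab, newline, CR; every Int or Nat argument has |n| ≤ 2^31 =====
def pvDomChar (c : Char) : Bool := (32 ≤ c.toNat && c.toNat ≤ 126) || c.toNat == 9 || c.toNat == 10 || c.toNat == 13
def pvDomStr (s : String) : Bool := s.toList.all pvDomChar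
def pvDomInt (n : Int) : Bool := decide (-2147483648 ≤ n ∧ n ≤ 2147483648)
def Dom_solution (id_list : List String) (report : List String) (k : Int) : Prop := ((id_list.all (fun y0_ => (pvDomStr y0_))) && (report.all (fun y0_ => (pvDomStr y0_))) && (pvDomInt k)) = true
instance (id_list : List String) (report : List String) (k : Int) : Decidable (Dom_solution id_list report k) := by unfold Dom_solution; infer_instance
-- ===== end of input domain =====

-- B replaces A's staged dict tallies by an independent per-id count over the parsed
-- report list (distinct targets this id reported whose distinct-reporter count
-- reaches k); objective: simpler.

-- pvParse rep = the (reporter, reported) pair when rep splits into exactly two words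
def pvParse (rep : String) : Option (String × String) :=
  match PySem.Str.split₀ rep with
  | [a, b] => some (a, b)
  | _ => none

-- ===== PORT A =====
def solution (id_list : List String) (report : List String) (k : Int) : List Int :=
  let reporterDict : PySem.Dict String Int :=
    id_list.foldl (fun d id => d.insert id 0) PySem.Dict.empty
  let reportedDict0 : PySem.Dict String (List String) :=
    id_list.foldl (fun d id => d.insert id []) PySem.Dict.empty
  let reportedDict : PySem.Dict String (List String) :=
    report.foldl (fun d rep =>
      match PySem.Str.split₀ rep with
      | [reporter, reported] => d.modify reported [] (fun l => l ++ [reporter])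
      | _ => d) reportedDict0
  let final : PySem.Dict String (List String) × PySem.Dict String Int :=
    reportedDict.keys.foldl (fun st key =>
      let s : PySem.Set String := PySem.Set.ofList (st.1.getD key [])
      let rd := st.1.insert key s
      if k ≤ PySem.Set.len s then
        (rd, s.foldl (fun rp id => rp.modify id 0 (fun n => n + 1)) st.2)
      else (rd, st.2)) (reportedDict, reporterDict)
  final.2.values

-- ===== PORT B =====
-- `tuple(rep.split())` unpacked as a 2-tuple: a line not splitting into exactly two
-- words would raise in Python (excluded by Pre_); the port skips such lines.
-- `dict.fromkeys id_list` = the ids deduped in first-occurrence order = PySem.Set.ofList.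
def solution_alt (id_list : List String) (report : List String) (k : Int) : List Int :=
  let pairs : List (String × String) := report.filterMap pvParse
  let score : String → Int := fun u =>
    (((PySem.Set.ofList ((pairs.filter (fun p => p.1 == u)).map (fun p => p.2))).countP
      (fun t => decide (k ≤ (((PySem.Set.ofList ((pairs.filter (fun p => p.2 == t)).map (fun p => p.1))).length : Int))))) : Int)
  (PySem.Set.ofList id_list).map score

-- ===== PRECONDITION & SPEC =====
def pvL (report : List String) : List (String × String) := report.filterMap pvParse

-- the distinct reporters of `key`, in first-occurrence order
def pvReporters (report : List String) (key : String) : List String :=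
  PySem.Set.ofList (((pvL report).filter (fun p => p.2 == key)).map (fun p => p.1))

-- Pre_solution holds exactly where the Python A returns normally: every report line
-- splits into exactly two words, every reported id is in id_list, and every reporter
-- whose target collected at least k distinct reporters is in id_list (otherwise A
-- raises ValueError or KeyError).
def Pre_solution (id_list : List String) (report : List String) (k : Int) : Prop :=
  (∀ rep ∈ report, (pvParse rep).isSome = true) ∧
  (∀ p ∈ pvL report, p.2 ∈ id_list) ∧
  (∀ p ∈ pvL report, k ≤ ((pvReporters report p.2).length : Int) → p.1 ∈ id_list)

instance (id_list : List String) (report : List String) (k : Int) :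
    Decidable (Pre_solution id_list report k) := by unfold Pre_solution; infer_instance

def pvWitness_solution : List String × List String × Int := (["a", "b"], ["a b", "b a"], 1)

def Spec_solution (id_list : List String) (report : List String) (k : Int) (out : List Int) : Prop := out = solution_alt id_list report k
instance (id_list : List String) (report : List String) (k : Int) (out : List Int) : Decidable (Spec_solution id_list report k out) := by unfold Spec_solution; infer_instance

-- ===== CLAIM (what is proved, stated in full; the proofs are below) =====
def Claim_equal_solution : Prop := ∀ (id_list : List String) (report : List String) (k : Int), Dom_solution id_list report k → Pre_solution id_list report k → Spec_solution id_list report k (solution id_list report k)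

-- ===== LEMMAS AND PROOFS =====

def pvIds (id_list : List String) : List String := PySem.Set.ofList id_list

-- the common normal form both ports are reduced to
def pvVal (id_list report : List String) (k : Int) (u : String) : Int :=
  ((pvIds id_list).countP (fun key =>
    decide (k ≤ ((pvReporters report key).length : Int)) &&
    decide (u ∈ pvReporters report key)) : Int)

theorem pv_update_of_forall_mem {α : Type} [BEq α] [LawfulBEq α] :
    ∀ (xs : List α) (s : PySem.Set α), (∀ x ∈ xs, x ∈ s) → PySem.Set.update s xs = s := by
  intro xs
  induction xs with
  | nil => intro s _; rfl
  | cons x xs ih =>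
    intro s h
    have hx : x ∈ s := h x (by simp)
    have hstep : PySem.Set.update s (x :: xs) = PySem.Set.update (s.add x) xs := by
      simp [PySem.Set.update]
    rw [hstep, PySem.Set.add_of_mem hx]
    exact ih s (fun y hy => h y (by simp [hy]))

theorem pv_keys_insert_const {ν : Type} (id_list : List String) (v : ν) :
    (id_list.foldl (fun d id => d.insert id v) PySem.Dict.empty).keys = pvIds id_list := by
  rw [PySem.Dict.keys_foldl_insert id_list (fun _ _ => v)]
  rw [pvIds, PySem.Set.ofList_eq_foldl]
  rfl

theorem pv_getD_insert_const {ν : Type} (id_list : List String) (v : ν) (u : String) :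
    (id_list.foldl (fun d id => d.insert id v) PySem.Dict.empty).getD u v = v := by
  suffices h : ∀ (l : List String) (d : PySem.Dict String ν), (∀ w, d.getD w v = v) →
      ∀ w, (l.foldl (fun d id => d.insert id v) d).getD w v = v by
    exact h id_list PySem.Dict.empty (fun _ => rfl) u
  intro l
  induction l with
  | nil => intro d h w; exact h w
  | cons x xs ih =>
    intro d h w
    simp only [List.foldl_cons]
    refine ih _ (fun w' => ?_) w
    by_cases hx : w' = x
    · subst hx; exact PySem.Dict.getD_insert_self d w' v v
    · rw [PySem.Dict.getD_insert_of_ne d v v hx]; exact h w'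

theorem pv_getD_modify_append_snd (L : List (String × String)) :
    ∀ (d : PySem.Dict String (List String)) (key : String),
    (L.foldl (fun d p => d.modify p.2 [] (fun l => l ++ [p.1])) d).getD key []
      = d.getD key [] ++ (L.filter (fun p => p.2 == key)).map (fun p => p.1) := by
  induction L with
  | nil => intro d key; simp
  | cons p L ih =>
    intro d key
    simp only [List.foldl_cons, List.filter_cons]
    by_cases h : p.2 = key
    · have hb : (p.2 == key) = true := by simp [h]
      simp only [hb, if_pos, List.map_cons]
      rw [ih]
      rw [← h, PySem.Dict.getD_modify_self d p.2 [] (fun l => l ++ [p.1])]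
      simp
    · have hb : (p.2 == key) = false := by simp [h]
      simp only [hb, Bool.false_eq_true, if_neg, not_false_iff]
      rw [ih]
      rw [PySem.Dict.getD_modify_of_ne d [] (fun l => l ++ [p.1]) (fun hk => h hk.symm)]

theorem pv_keys_modify_append_snd (L : List (String × String))
    (d : PySem.Dict String (List String)) :
    (L.foldl (fun d p => d.modify p.2 [] (fun l => l ++ [p.1])) d).keys
      = PySem.Set.update d.keys (L.map (fun p => p.2)) :=
  PySem.Dict.keys_foldl_modify_key L (fun p => p.2) [] (fun _ p => fun l => l ++ [p.1]) d

theorem pv_mem_reporters (report : List String) (key a : String) :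
    a ∈ pvReporters report key ↔ (a, key) ∈ pvL report := by
  unfold pvReporters
  rw [PySem.Set.mem_ofList]
  simp only [List.mem_map, List.mem_filter, beq_iff_eq]
  constructor
  · rintro ⟨p, ⟨hp, h2⟩, h1⟩
    have hpe : p = (a, key) := by cases p; simp_all
    rwa [hpe] at hp
  · intro h
    exact ⟨(a, key), ⟨h, rfl⟩, rfl⟩

theorem pv_foldA : ∀ (report : List String) (init : PySem.Dict String (List String)),
    report.foldl (fun d rep =>
      match PySem.Str.split₀ rep with
      | [reporter, reported] => d.modify reported [] (fun l => l ++ [reporter])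
      | _ => d) init
    = (pvL report).foldl (fun d p => d.modify p.2 [] (fun l => l ++ [p.1])) init := by
  intro report
  induction report with
  | nil => intro init; rfl
  | cons x xs ih =>
    intro init
    simp only [pvL, List.filterMap_cons] at ih ⊢
    simp only [List.foldl_cons]
    rcases h : PySem.Str.split₀ x with _ | ⟨a, _ | ⟨b, _ | ⟨c, t⟩⟩⟩ <;>
      simp [pvParse, h, ih]

-- A's third loop: the dict of reporter lists is read at each key exactly once, so the
-- carried first component can be replaced by the fixed pre-loop dict.
theorem pv_pair_elim (k : Int) (dref : PySem.Dict String (List String)) :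
    ∀ (keys : List String) (rd : PySem.Dict String (List String)) (rp : PySem.Dict String Int),
    keys.Nodup → (∀ key ∈ keys, rd.getD key [] = dref.getD key []) →
    (keys.foldl (fun st key =>
      let s : PySem.Set String := PySem.Set.ofList (st.1.getD key [])
      let rd := st.1.insert key s
      if k ≤ PySem.Set.len s then
        (rd, s.foldl (fun rp id => rp.modify id 0 (fun n => n + 1)) st.2)
      else (rd, st.2)) (rd, rp)).2
    = keys.foldl (fun rp key =>
        let s : PySem.Set String := PySem.Set.ofList (dref.getD key [])
        if k ≤ PySem.Set.len s then
          s.foldl (fun rp id => rp.modify id 0 (fun n => n + 1)) rp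
        else rp) rp := by
  intro keys
  induction keys with
  | nil => intro rd rp _ _; rfl
  | cons key keys ih =>
    intro rd rp hnd hread
    have hkey : rd.getD key [] = dref.getD key [] := hread key (by simp)
    have hne : ∀ key' ∈ keys, key' ≠ key := fun key' hk' heq => by
      exact (List.nodup_cons.mp hnd).1 (heq ▸ hk')
    have hread' : ∀ key' ∈ keys,
        (rd.insert key (PySem.Set.ofList (rd.getD key []))).getD key' [] = dref.getD key' [] := by
      intro key' hk'
      rw [PySem.Dict.getD_insert_of_ne rd _ [] (hne key' hk')]
      exact hread key' (List.mem_cons_of_mem _ hk')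
    simp only [List.foldl_cons]
    rw [hkey]
    by_cases hc : k ≤ PySem.Set.len (PySem.Set.ofList (dref.getD key []))
    · simp only [if_pos hc]
      exact ih _ _ (List.nodup_cons.mp hnd).2 (hkey ▸ hread')
    · simp only [if_neg hc]
      exact ih _ _ (List.nodup_cons.mp hnd).2 (hkey ▸ hread')

theorem pv_getD_outer (k : Int) (dref : PySem.Dict String (List String)) :
    ∀ (keys : List String) (rp : PySem.Dict String Int) (u : String),
    (keys.foldl (fun rp key =>
        let s : PySem.Set String := PySem.Set.ofList (dref.getD key [])
        if k ≤ PySem.Set.len s then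
          s.foldl (fun rp id => rp.modify id 0 (fun n => n + 1)) rp
        else rp) rp).getD u 0
    = rp.getD u 0 + (keys.countP (fun key =>
        decide (k ≤ PySem.Set.len (PySem.Set.ofList (dref.getD key []))) &&
        decide (u ∈ PySem.Set.ofList (dref.getD key []))) : Int) := by
  intro keys
  induction keys with
  | nil => intro rp u; simp
  | cons key keys ih =>
    intro rp u
    simp only [List.foldl_cons, List.countP_cons]
    by_cases hc : k ≤ PySem.Set.len (PySem.Set.ofList (dref.getD key []))
    · simp only [if_pos hc]
      rw [ih]
      rw [PySem.Dict.getD_foldl_modify_add_one (PySem.Set.ofList (dref.getD key [])) rp u]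
      by_cases hu : u ∈ PySem.Set.ofList (dref.getD key [])
      · have h1 : List.count u (PySem.Set.ofList (dref.getD key [])) = 1 :=
          List.count_eq_one_of_mem (PySem.Set.nodup_ofList _) hu
        have hp : (decide (k ≤ PySem.Set.len (PySem.Set.ofList (dref.getD key []))) &&
            decide (u ∈ PySem.Set.ofList (dref.getD key []))) = true := by
          simp only [Bool.and_eq_true, decide_eq_true_eq]; exact ⟨hc, hu⟩
        rw [h1, hp]
        simp only [if_true]
        push_cast
        omega
      · have h0 : List.count u (PySem.Set.ofList (dref.getD key [])) = 0 :=
          List.count_eq_zero_of_not_mem hu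
        have hp : (decide (k ≤ PySem.Set.len (PySem.Set.ofList (dref.getD key []))) &&
            decide (u ∈ PySem.Set.ofList (dref.getD key []))) = false := by
          simp only [Bool.and_eq_false_iff, decide_eq_false_iff_not]; right; exact hu
        rw [h0, hp]
        simp only [Bool.false_eq_true, if_false]
        push_cast
        omega
    · simp only [if_neg hc]
      rw [ih]
      have hp : (decide (k ≤ PySem.Set.len (PySem.Set.ofList (dref.getD key []))) &&
          decide (u ∈ PySem.Set.ofList (dref.getD key []))) = false := by
        simp only [Bool.and_eq_false_iff, decide_eq_false_iff_not]; left; exact hc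
      rw [hp]
      simp only [Bool.false_eq_true, if_false]
      push_cast
      omega

theorem pv_keys_outer (k : Int) (dref : PySem.Dict String (List String)) :
    ∀ (keys : List String) (rp : PySem.Dict String Int),
    (∀ key ∈ keys, k ≤ PySem.Set.len (PySem.Set.ofList (dref.getD key [])) →
      ∀ x ∈ PySem.Set.ofList (dref.getD key []), x ∈ rp.keys) →
    (keys.foldl (fun rp key =>
        let s : PySem.Set String := PySem.Set.ofList (dref.getD key [])
        if k ≤ PySem.Set.len s then
          s.foldl (fun rp id => rp.modify id 0 (fun n => n + 1)) rp
        else rp) rp).keys = rp.keys := by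
  intro keys
  induction keys with
  | nil => intro rp _; rfl
  | cons key keys ih =>
    intro rp h
    simp only [List.foldl_cons]
    by_cases hc : k ≤ PySem.Set.len (PySem.Set.ofList (dref.getD key []))
    · simp only [if_pos hc]
      have hkeys : ((PySem.Set.ofList (dref.getD key [])).foldl
          (fun rp id => rp.modify id 0 (fun n => n + 1)) rp).keys = rp.keys := by
        rw [PySem.Dict.keys_foldl_modify (PySem.Set.ofList (dref.getD key [])) 0
          (fun _ _ => (fun n => n + 1)) rp]
        exact pv_update_of_forall_mem _ _ (h key (by simp) hc)
      rw [ih _ (fun key' hk' hck x hx => by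
        rw [hkeys]; exact h key' (List.mem_cons_of_mem _ hk') hck x hx)]
      exact hkeys
    · simp only [if_neg hc]
      exact ih _ (fun key' hk' => h key' (List.mem_cons_of_mem _ hk'))

theorem pv_solution_eq (id_list report : List String) (k : Int)
    (h : Pre_solution id_list report k) :
    solution id_list report k = (pvIds id_list).map (pvVal id_list report k) := by
  obtain ⟨h1, h2, h3⟩ := h
  simp only [solution]
  rw [pv_foldA]
  set d0d := id_list.foldl (fun d id => d.insert id ([] : List String)) PySem.Dict.empty with hd0d
  set d2 := (pvL report).foldl (fun d p => d.modify p.2 [] (fun l => l ++ [p.1])) d0d with hd2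
  have hgetD2 : ∀ key, d2.getD key [] = ((pvL report).filter (fun p => p.2 == key)).map (fun p => p.1) := by
    intro key
    rw [hd2, pv_getD_modify_append_snd, hd0d, pv_getD_insert_const]
    simp
  have hS : ∀ key, PySem.Set.ofList (d2.getD key []) = pvReporters report key := by
    intro key; rw [hgetD2 key]; rfl
  have hkeys2 : d2.keys = pvIds id_list := by
    rw [hd2, pv_keys_modify_append_snd, hd0d, pv_keys_insert_const]
    apply pv_update_of_forall_mem
    intro x hx
    simp only [List.mem_map] at hx
    obtain ⟨p, hp, hpx⟩ := hx
    rw [pvIds, PySem.Set.mem_ofList]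
    exact hpx ▸ h2 p hp
  have hlen : ∀ (s : PySem.Set String), PySem.Set.len s = (s.length : Int) := fun _ => rfl
  rw [hkeys2]
  rw [pv_pair_elim k d2 (pvIds id_list) d2 _ (PySem.Set.nodup_ofList id_list) (fun key _ => rfl)]
  have hcond : ∀ key ∈ pvIds id_list, k ≤ PySem.Set.len (PySem.Set.ofList (d2.getD key [])) →
      ∀ x ∈ PySem.Set.ofList (d2.getD key []),
      x ∈ (id_list.foldl (fun d id => d.insert id (0 : Int)) PySem.Dict.empty).keys := by
    intro key _ hk x hx
    rw [hS key] at hk hx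
    rw [hlen] at hk
    have hxl : x ∈ id_list := h3 (x, key) ((pv_mem_reporters report key x).mp hx) hk
    rw [pv_keys_insert_const, pvIds, PySem.Set.mem_ofList]
    exact hxl
  have hkeysfin : ((pvIds id_list).foldl (fun rp key =>
      let s : PySem.Set String := PySem.Set.ofList (d2.getD key [])
      if k ≤ PySem.Set.len s then
        s.foldl (fun rp id => rp.modify id 0 (fun n => n + 1)) rp
      else rp) (id_list.foldl (fun d id => d.insert id (0 : Int)) PySem.Dict.empty)).keys
      = pvIds id_list := by
    rw [pv_keys_outer k d2 (pvIds id_list) _ hcond, pv_keys_insert_const]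
  rw [PySem.Dict.values_eq_map_keys _ (by rw [hkeysfin]; exact PySem.Set.nodup_ofList id_list) 0]
  rw [hkeysfin]
  apply List.map_congr_left
  intro u _
  rw [pv_getD_outer k d2 (pvIds id_list) _ u, pv_getD_insert_const]
  simp only [hS, hlen]
  rw [pvVal]
  ring

-- B side: the distinct targets u reported
theorem pv_mem_targets (report : List String) (u t : String) :
    t ∈ (PySem.Set.ofList (((pvL report).filter (fun p => p.1 == u)).map (fun p => p.2)))
      ↔ (u, t) ∈ pvL report := by
  rw [PySem.Set.mem_ofList]
  simp only [List.mem_map, List.mem_filter, beq_iff_eq]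
  constructor
  · rintro ⟨p, ⟨hp, h1⟩, h2⟩
    have hpe : p = (u, t) := by cases p; simp_all
    rwa [hpe] at hp
  · intro h
    exact ⟨(u, t), ⟨h, rfl⟩, rfl⟩

theorem pv_solution_alt_eq (id_list report : List String) (k : Int)
    (h : Pre_solution id_list report k) :
    solution_alt id_list report k = (pvIds id_list).map (pvVal id_list report k) := by
  obtain ⟨h1, h2, h3⟩ := h
  simp only [solution_alt]
  apply List.map_congr_left
  intro u _
  rw [pvVal]
  -- the inner filtered-map sets are exactly pvL / pvReporters
  show (((PySem.Set.ofList (((pvL report).filter (fun p => p.1 == u)).map (fun p => p.2))).countP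
      (fun t => decide (k ≤ ((pvReporters report t).length : Int)))) : Int) = _
  set Tu := PySem.Set.ofList (((pvL report).filter (fun p => p.1 == u)).map (fun p => p.2)) with hTu
  set c := fun t => decide (k ≤ ((pvReporters report t).length : Int)) with hc
  -- the RHS counts over pvIds the conjunction; restrict to the filter and use a permutation
  have hcountP : (pvIds id_list).countP (fun key => c key && decide (u ∈ pvReporters report key))
      = ((pvIds id_list).filter (fun key => decide (u ∈ pvReporters report key))).countP c := by
    rw [List.countP_filter]
  have hperm : ((pvIds id_list).filter (fun key => decide (u ∈ pvReporters report key))).Perm Tu := by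
    refine (List.perm_ext_iff_of_nodup ?_ ?_).mpr ?_
    · exact (PySem.Set.nodup_ofList _).filter _
    · exact hTu ▸ PySem.Set.nodup_ofList _
    intro t
    rw [List.mem_filter, hTu, pv_mem_targets]
    simp only [decide_eq_true_eq]
    constructor
    · rintro ⟨_, hm⟩; exact (pv_mem_reporters report t u).mp hm
    · intro hm
      refine ⟨?_, (pv_mem_reporters report t u).mpr hm⟩
      rw [pvIds, PySem.Set.mem_ofList]
      exact h2 (u, t) hm
  rw [hcountP, hperm.countP_eq]

-- ===== VERDICT (by name: the statement is the Claim_ definition above) =====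
theorem solution_spec : Claim_equal_solution := by
  intro id_list report k _hdom hpre
  unfold Spec_solution
  rw [pv_solution_eq id_list report k hpre, pv_solution_alt_eq id_list report k hpre]
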